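-- pv_equiv track=rewrite | github.com/jeongwon-Yang/Rokey2 | weekly5/Jeongwon/2024_10_23.py | solution
-- ===== SOURCE A (Python) =====
-- def solution(k, score):
--     lst = []
--     result = []
--     for i in score:
--         lst.append(i)
--         lst = sorted(lst, reverse = True)
--         result.append(lst[0:k][-1])
--     return result
-- ===== SOURCE B (Python) =====
-- def solution(k, score):
--     # Maintain one ascending list by linear insertion (no re-sort per step);
--     # the k-th highest of the prefix is then read off by index from the end.
--     lst = []
--     result = []
--     for x in score:
--         j = 0
--         while j < len(lst) and lst[j] < x:
--             j += 1
--         lst.insert(j, x)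
--         result.append(lst[len(lst) - k] if k <= len(lst) else lst[0])
--     return result
-- ===== Notes on version B (the rewrite author's own statement) =====
-- stated objective: alternative
-- what changed: Instead of re-sorting the whole prefix in descending order at every step and slicing off the top k, B maintains a single ascending list by linear insertion and reads the k-th highest by direct index from the end.
import Mathlib
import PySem

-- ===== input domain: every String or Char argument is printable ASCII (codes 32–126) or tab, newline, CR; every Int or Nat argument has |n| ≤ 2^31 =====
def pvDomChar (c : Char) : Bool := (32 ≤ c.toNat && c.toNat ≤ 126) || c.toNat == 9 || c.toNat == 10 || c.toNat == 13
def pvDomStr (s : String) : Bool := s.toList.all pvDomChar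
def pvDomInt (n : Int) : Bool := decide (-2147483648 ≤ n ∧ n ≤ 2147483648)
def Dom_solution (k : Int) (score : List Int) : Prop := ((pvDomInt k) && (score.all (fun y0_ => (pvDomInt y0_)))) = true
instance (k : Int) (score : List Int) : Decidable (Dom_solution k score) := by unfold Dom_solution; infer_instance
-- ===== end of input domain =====

-- B replaces A's per-step full descending re-sort + slice by one ascending list
-- maintained by linear insertion, reading the k-th highest by index from the end (alternative decomposition).


-- ===== PORT A =====
-- loop body of A: lst.append(i); lst = sorted(lst, reverse=True); result.append(lst[0:k][-1])
-- lst[0:k][-1] raises IndexError when the slice is empty (k ≤ 0 here); the port yields the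
-- junk value 0 there via .getD — exactly those inputs are excluded by Pre_solution.
def stepA (k : Int) (st : List Int × List Int) (i : Int) : List Int × List Int :=
  let lst := PySem.List.sorted (st.1 ++ [i]) (fun x => x) true
  (lst, st.2 ++ [(PySem.List.pyGet? (PySem.List.slice lst (some 0) (some k)) (-1)).getD 0])

def solution (k : Int) (score : List Int) : List Int :=
  (score.foldl (stepA k) ([], [])).2

-- ===== PORT B =====
-- the while loop 'j = 0; while j < len(lst) and lst[j] < x: j += 1' followed by lst.insert(j, x)
def insertAsc (x : Int) : List Int → List Int
  | [] => [x]
  | y :: ys => if y < x then y :: insertAsc x ys else x :: y :: ys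

-- loop body of B; lst[len(lst)-k] is an in-range non-negative index when 1 ≤ k ≤ len(lst),
-- and lst[0] is in range since lst is non-empty: ported as getD / headD.
def stepB (k : Int) (st : List Int × List Int) (x : Int) : List Int × List Int :=
  let lst := insertAsc x st.1
  (lst, st.2 ++ [if k ≤ (lst.length : Int) then lst.getD (lst.length - k.toNat) 0 else lst.headD 0])

def solution_alt (k : Int) (score : List Int) : List Int :=
  (score.foldl (stepB k) ([], [])).2

-- ===== PRECONDITION & SPEC =====
-- On k ≤ 0 with non-empty score both Pythons raise IndexError (A on lst[0:k][-1], B on lst[len(lst)-k]).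
def Pre_solution (k : Int) (score : List Int) : Prop := 1 ≤ k ∨ score = []
instance (k : Int) (score : List Int) : Decidable (Pre_solution k score) := by unfold Pre_solution; infer_instance
def pvWitness_solution : Int × List Int := (2, [5, 1, 3])

def Spec_solution (k : Int) (score : List Int) (out : List Int) : Prop := out = solution_alt k score
instance (k : Int) (score : List Int) (out : List Int) : Decidable (Spec_solution k score out) := by unfold Spec_solution; infer_instance

-- ===== CLAIM (what is proved, stated in full; the proofs are below) =====
def Claim_equal_solution : Prop := ∀ (k : Int) (score : List Int), Dom_solution k score → Pre_solution k score → Spec_solution k score (solution k score)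

-- ===== LEMMAS AND PROOFS =====

theorem insertAsc_perm (x : Int) (l : List Int) : (insertAsc x l).Perm (x :: l) := by
  induction l with
  | nil => simp [insertAsc]
  | cons y ys ih =>
    simp only [insertAsc]
    split
    · exact (ih.cons y).trans (List.Perm.swap x y ys)
    · exact List.Perm.refl _

theorem insertAsc_pairwise (x : Int) (l : List Int) (h : l.Pairwise (· ≤ ·)) :
    (insertAsc x l).Pairwise (· ≤ ·) := by
  induction l with
  | nil => simp [insertAsc]
  | cons y ys ih =>
    rcases List.pairwise_cons.mp h with ⟨hy, hys⟩
    simp only [insertAsc]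
    split
    · rename_i hlt
      refine List.pairwise_cons.mpr ⟨?_, ih hys⟩
      intro a ha
      rcases List.mem_cons.mp (((insertAsc_perm x ys).mem_iff).mp ha) with heq | ha'
      · rw [heq]; exact le_of_lt hlt
      · exact hy a ha'
    · rename_i hge
      refine List.pairwise_cons.mpr ⟨?_, h⟩
      intro a ha
      rcases List.mem_cons.mp ha with heq | ha'
      · rw [heq]; omega
      · exact le_trans (by omega) (hy a ha')

theorem insertAsc_ne_nil (x : Int) (l : List Int) : insertAsc x l ≠ [] := by
  have := (insertAsc_perm x l).length_eq
  intro h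
  simp [h] at this

-- the two loop bodies agree and keep the invariant "A's list = reverse of B's list"
theorem step_eq (k : Int) (hk : 1 ≤ k) (b0 : List Int) (hB : b0.Pairwise (· ≤ ·))
    (acc : List Int) (i : Int) :
    stepA k (b0.reverse, acc) i = ((insertAsc i b0).reverse, (stepB k (b0, acc) i).2) := by
  have hlist : PySem.List.sorted (b0.reverse ++ [i]) (fun x => x) true = (insertAsc i b0).reverse := by
    have hperm : (PySem.List.sorted (b0.reverse ++ [i]) (fun x => x) true).Perm
        ((insertAsc i b0).reverse) := by
      refine (PySem.List.sorted_perm _ _ _).trans ?_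
      have hp1 : (b0.reverse ++ [i]).Perm (i :: b0) :=
        (List.perm_append_singleton i b0.reverse).trans ((List.reverse_perm b0).cons i)
      have hp2 : ((insertAsc i b0).reverse).Perm (i :: b0) :=
        (List.reverse_perm _).trans (insertAsc_perm i b0)
      exact hp1.trans hp2.symm
    have hs1 : (PySem.List.sorted (b0.reverse ++ [i]) (fun x => x) true).Pairwise
        (fun a b => (fun x => x) b ≤ (fun x => x) a) := PySem.List.sorted_pairwise_rev _ _
    have hs2 : ((insertAsc i b0).reverse).Pairwise (fun a b : Int => b ≤ a) :=
      (List.pairwise_reverse).mpr (insertAsc_pairwise i b0 hB)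
    exact List.Perm.eq_of_pairwise
      (fun a b _ _ h1 h2 => le_antisymm h2 h1) hs1 hs2 hperm
  have hb' : insertAsc i b0 ≠ [] := insertAsc_ne_nil i b0
  set b : List Int := insertAsc i b0 with hb
  have hn : 0 < b.length := List.length_pos_of_ne_nil hb'
  simp only [stepA, stepB, hlist]
  refine Prod.ext rfl ?_
  simp only
  congr 1
  -- value equality
  have hsl : PySem.List.slice b.reverse (some 0) (some k) = b.reverse.take k.toNat := by
    rw [PySem.List.slice_zero_start, PySem.List.slice_to _ (by omega)]
  rw [hsl, PySem.List.pyGet?_neg_one, List.getLast?_eq_getElem?]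
  set m : Nat := k.toNat with hm
  have hm1 : 1 ≤ m := by omega
  have hlen : (b.reverse.take m).length = min m b.length := by simp
  have hmin1 : 1 ≤ min m b.length := le_min hm1 hn
  have hminn : min m b.length ≤ b.length := min_le_right _ _
  have hidx : (b.reverse.take m).length - 1 < (b.reverse.take m).length := by
    rw [hlen]; omega
  rw [List.getElem?_eq_getElem hidx]
  simp only [Option.getD_some]
  rw [List.getElem_take, List.getElem_reverse]
  simp only [hlen, ← hb]
  by_cases hcase : k ≤ (b.length : Int)
  · have hmn : m ≤ b.length := by omega
    rw [if_pos hcase]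
    have he : b.length - 1 - (min m b.length - 1) = b.length - m := by omega
    simp only [he]
    rw [List.getD_eq_getElem _ _ (show b.length - m < b.length by omega)]
  · have hmn : b.length < m := by omega
    rw [if_neg hcase]
    have he : b.length - 1 - (min m b.length - 1) = 0 := by omega
    simp only [he]
    obtain ⟨c, cs, hcb⟩ := List.exists_cons_of_ne_nil hb'
    simp only [hcb]
    simp

theorem loop_eq (k : Int) (hk : 1 ≤ k) :
    ∀ (score b0 acc : List Int), b0.Pairwise (· ≤ ·) →
      (score.foldl (stepA k) (b0.reverse, acc)).2 = (score.foldl (stepB k) (b0, acc)).2 := by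
  intro score
  induction score with
  | nil => intro b0 acc _; rfl
  | cons i rest ih =>
    intro b0 acc hB
    rw [List.foldl_cons, List.foldl_cons, step_eq k hk b0 hB acc i]
    exact ih (insertAsc i b0) _ (insertAsc_pairwise i b0 hB)

-- ===== VERDICT (by name: the statement is the Claim_ definition above) =====
theorem solution_spec : Claim_equal_solution := by
  intro k score _ hpre
  unfold Spec_solution solution solution_alt
  rcases hpre with hk | rfl
  · exact loop_eq k hk score [] [] List.Pairwise.nil
  · rfl
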